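-- pv_equiv track=rewrite | github.com/AndreyUrus/Adaptive-Gaussian-Receptive-Fields-SNN | decoding_accuracy.py | nCorrectBits
-- ===== SOURCE A (Python) =====
-- def nCorrectBits(a, b, maxnbits):
--     fl = 1 << (maxnbits - 1)
--     ret = 0
--     bStart = False
--     while fl != 0 and (a & fl) == (b & fl):
--         if (a & fl) != 0:
--             bStart = True
--         if bStart:
--             ret += 1
--         fl >>= 1
--     return ret
-- ===== SOURCE B (Python) =====
-- def nCorrectBits(a, b, maxnbits):
--     top = 1 << (maxnbits - 1)          # like A, raises ValueError for maxnbits <= 0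
--     mask = (top << 1) - 1
--     k = ((a ^ b) & mask).bit_length()  # position just above the highest mismatching bit
--     return ((a & mask) >> k).bit_length()
-- ===== Notes on version B (the rewrite author's own statement) =====
-- stated objective: faster
-- what changed: Replaced the bit-by-bit scanning loop over all maxnbits positions with a closed-form computation: mask the operands, locate the first mismatch with (a^b).bit_length(), and read the count of matching leading bits off ((a&mask)>>k).bit_length().
import Mathlib
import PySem

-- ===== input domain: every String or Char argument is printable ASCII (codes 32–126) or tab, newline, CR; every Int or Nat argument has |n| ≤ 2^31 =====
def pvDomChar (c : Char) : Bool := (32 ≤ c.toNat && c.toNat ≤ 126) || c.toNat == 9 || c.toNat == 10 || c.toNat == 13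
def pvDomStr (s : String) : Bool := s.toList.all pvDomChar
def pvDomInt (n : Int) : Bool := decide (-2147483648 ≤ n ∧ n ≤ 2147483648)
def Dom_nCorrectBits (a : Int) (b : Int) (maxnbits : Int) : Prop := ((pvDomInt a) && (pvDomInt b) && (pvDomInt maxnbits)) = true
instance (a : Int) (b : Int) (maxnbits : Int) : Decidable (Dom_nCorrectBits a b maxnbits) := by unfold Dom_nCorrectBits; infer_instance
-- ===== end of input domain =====

-- B replaces A's bit-by-bit scanning loop by a closed-form bit_length computation (O(1) big-int ops instead of a loop over maxnbits positions).


-- ===== PORT A =====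
-- Python's '1 << m' (m : Nat); computed through Nat's primitive shift because Int's own
-- '<<<' cannot be evaluated at m near 2^31; proved equal to 2 ^ m in pvPow2_eq below
def pvPow2 (m : Nat) : Int := ((1 <<< m : Nat) : Int)

-- the while loop of A; guard '0 < fl' is Python's 'fl != 0' (fl is reachable only as a
-- nonnegative power of two here; the strict guard only makes the recursion total)
def nCorrectBitsLoop (a b : Int) (fl : Int) (ret : Int) (bStart : Bool) : Int :=
  if h : 0 < fl ∧ PySem.Int.band a fl = PySem.Int.band b fl then
    nCorrectBitsLoop a b (fl >>> (1 : Nat))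
      (if bStart || decide (PySem.Int.band a fl ≠ 0) then ret + 1 else ret)
      (bStart || decide (PySem.Int.band a fl ≠ 0))
  else ret
termination_by fl.toNat
decreasing_by
  rw [Int.shiftRight_eq_div_pow]
  have := h.1
  have h2 : ((2 ^ (1:Nat) : Nat) : Int) = 2 := by norm_num
  rw [h2]
  omega

-- A raises ValueError for maxnbits ≤ 0 ('1 << negative'); Pre_ excludes that, so the
-- '.toNat' clamp below is never reached on admitted inputs
def nCorrectBits (a : Int) (b : Int) (maxnbits : Int) : Int :=
  nCorrectBitsLoop a b (pvPow2 (maxnbits - 1).toNat) 0 false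

-- ===== PORT B =====
-- Python's int.bit_length(), ported by hand (binary splitting over shift amounts) because
-- it must evaluate on values with ~2^31 bits, which PySem.Int.bitLength's unary recursion
-- cannot; proved equal to Nat.size (= bit_length on naturals) in pvBitLen_eq below.
def pvSizeGo : Nat → Nat → Nat → Nat
  | 0, n, _ => n
  | fuel + 1, n, e =>
    if e ≤ 1 then n
    else
      let h := e / 2
      if n >>> h = 0 then pvSizeGo fuel n h
      else h + pvSizeGo fuel (n >>> h) (e - h)

def pvSizeUp : Nat → Nat → Nat → Nat
  | 0, n, e => pvSizeGo e n e
  | fuel + 1, n, e => if n >>> e = 0 then pvSizeGo e n e else pvSizeUp fuel n (e * 2)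

def pvBitLen (x : Int) : Nat := pvSizeUp (x.natAbs + 1) x.natAbs 1

def nCorrectBits_alt (a : Int) (b : Int) (maxnbits : Int) : Int :=
  let top : Int := pvPow2 (maxnbits - 1).toNat
  let mask : Int := (top <<< (1 : Nat)) - 1
  let k : Nat := pvBitLen (PySem.Int.band (PySem.Int.bxor a b) mask)
  ((pvBitLen ((PySem.Int.band a mask) >>> k) : Nat) : Int)

-- ===== PRECONDITION & SPEC =====
-- Pre_ excludes exactly maxnbits ≤ 0, where the Python A raises ValueError ('1 << negative')
def Pre_nCorrectBits (a : Int) (b : Int) (maxnbits : Int) : Prop := 1 ≤ maxnbits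
instance (a : Int) (b : Int) (maxnbits : Int) : Decidable (Pre_nCorrectBits a b maxnbits) := by unfold Pre_nCorrectBits; infer_instance
def pvWitness_nCorrectBits : Int × Int × Int := (5, 4, 3)

def Spec_nCorrectBits (a : Int) (b : Int) (maxnbits : Int) (out : Int) : Prop := out = nCorrectBits_alt a b maxnbits
instance (a : Int) (b : Int) (maxnbits : Int) (out : Int) : Decidable (Spec_nCorrectBits a b maxnbits out) := by unfold Spec_nCorrectBits; infer_instance

-- ===== CLAIM (what is proved, stated in full; the proofs are below) =====
def Claim_equal_nCorrectBits : Prop := ∀ (a : Int) (b : Int) (maxnbits : Int), Dom_nCorrectBits a b maxnbits → Pre_nCorrectBits a b maxnbits → Spec_nCorrectBits a b maxnbits (nCorrectBits a b maxnbits)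

-- ===== LEMMAS AND PROOFS =====

-- the low n bits of a, as a Nat (Python's a % 2**n)
def pvM (a : Int) (n : Nat) : Nat := (a % ((2 ^ n : Nat) : Int)).toNat

-- Nat model of A's loop: scan bits j, j-1, …, 0 of x and y
def pvCnt (x y : Nat) : Bool → Nat → Int
  | bS, 0 =>
    if x.testBit 0 = y.testBit 0 then (if bS || x.testBit 0 then (1 : Int) else 0) else 0
  | bS, j + 1 =>
    if x.testBit (j + 1) = y.testBit (j + 1) then
      (if bS || x.testBit (j + 1) then (1 : Int) else 0) + pvCnt x y (bS || x.testBit (j + 1)) j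
    else 0

theorem pvM_lt (a : Int) (n : Nat) : pvM a n < 2 ^ n := by
  unfold pvM
  have h1 : (0:Int) < ((2 ^ n : Nat) : Int) := by positivity
  have h2 := Int.emod_lt_of_pos a h1
  have h3 := Int.emod_nonneg a (by omega : ((2 ^ n : Nat) : Int) ≠ 0)
  omega

theorem pvM_of_nonneg (a : Int) (h : 0 ≤ a) (n : Nat) : pvM a n = a.toNat % 2 ^ n := by
  unfold pvM
  rw [← Int.toNat_of_nonneg h, ← Int.natCast_mod, Int.toNat_natCast, Int.toNat_natCast]

theorem pvM_of_neg (a : Int) (h : a < 0) (n : Nat) :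
    pvM a n = 2 ^ n - 1 - (-a - 1).toNat % 2 ^ n := by
  unfold pvM
  set t : Nat := 2 ^ n with htdef
  have ht : 1 <= t := Nat.one_le_two_pow
  set m : Nat := (-a - 1).toNat with hm
  have ha : a = -((m : Int) + 1) := by omega
  have hdiv : (m : Int) = (t : Int) * ((m / t : Nat) : Int) + ((m % t : Nat) : Int) := by
    exact_mod_cast (Nat.div_add_mod m t).symm
  have hrlt : m % t < t := Nat.mod_lt _ (by omega)
  have hdecomp : a = ((t : Int) - 1 - ((m % t : Nat) : Int)) + (t : Int) * (-(((m / t : Nat) : Int)) - 1) := by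
    rw [ha, hdiv]; ring
  have hstep : a % (t : Int) = (t : Int) - 1 - ((m % t : Nat) : Int) := by
    rw [hdecomp, Int.add_mul_emod_self_left]
    apply Int.emod_eq_of_lt <;> omega
  rw [hstep]
  omega

theorem pvM_mod (a : Int) (n k : Nat) (h : k ≤ n) : pvM a n % 2 ^ k = pvM a k := by
  unfold pvM
  have hd : ((2 ^ k : Nat) : Int) ∣ ((2 ^ n : Nat) : Int) := by
    exact_mod_cast pow_dvd_pow 2 h
  have := Int.emod_emod_of_dvd a hd
  have h1 : (0:Int) ≤ a % ((2 ^ n : Nat) : Int) := Int.emod_nonneg a (by positivity)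
  have h2 : (a % ((2 ^ n : Nat) : Int)).toNat % 2 ^ k = ((a % ((2 ^ n : Nat) : Int)) % ((2 ^ k : Nat) : Int)).toNat := by
    rw [← Int.toNat_of_nonneg h1, ← Int.natCast_mod, Int.toNat_natCast, Int.toNat_natCast]
  rw [h2, this]

-- bit i of the complement 2^N-1-k (k < 2^N, i < N) is the negation of bit i of k
theorem pvTestBit_compl (N k i : Nat) (hk : k < 2 ^ N) (hi : i < N) :
    (2 ^ N - 1 - k).testBit i = !k.testBit i := by
  rw [Nat.testBit_eq_decide_div_mod_eq, Nat.testBit_eq_decide_div_mod_eq]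
  set A : Nat := 2 ^ i with hA
  set B : Nat := 2 ^ (N - i) with hB
  have hA1 : 1 <= A := Nat.one_le_two_pow
  have hB1 : 1 <= B := Nat.one_le_two_pow
  have hsplit : 2 ^ N = B * A := by rw [hA, hB, ← pow_add]; congr 1; omega
  have hsplit' : 2 ^ N = A * B := by rw [hsplit]; ring
  have hqr : A * (k / A) + k % A = k := Nat.div_add_mod k A
  have hrlt : k % A < A := Nat.mod_lt _ (by omega)
  have hqlt : k / A < B := Nat.div_lt_of_lt_mul (by omega)
  have hmulsub : A * (B - (1 + k / A)) = A * B - A * (1 + k / A) := Nat.mul_sub A B (1 + k / A)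
  have hmul1 : A * (1 + k / A) = A + A * (k / A) := by ring
  have hmulle : A * (1 + k / A) <= A * B := Nat.mul_le_mul_left A (by omega)
  have hkey : 2 ^ N - 1 - k = (A - 1 - k % A) + A * (B - 1 - k / A) := by
    have hbq : B - 1 - k / A = B - (1 + k / A) := by omega
    rw [hbq]
    omega
  have hdiv : (2 ^ N - 1 - k) / A = B - 1 - k / A := by
    rw [hkey, Nat.add_mul_div_left _ _ (by omega : 0 < A), Nat.div_eq_of_lt (by omega), Nat.zero_add]
  rw [hdiv]
  have hBeven : 2 ∣ B := by rw [hB]; exact dvd_pow_self 2 (by omega)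
  rcases hBeven with ⟨u, hu⟩
  rcases Nat.mod_two_eq_zero_or_one (k / A) with hp | hp
  · have : (B - 1 - k / A) % 2 = 1 := by omega
    simp [this, hp]
  · have : (B - 1 - k / A) % 2 = 0 := by omega
    simp [this, hp]

-- a & 2^j reads bit j of the low j+1 bits of a
theorem pvBandPow (a : Int) (j : Nat) :
    PySem.Int.band a ((2 : Int) ^ j) = (((pvM a (j + 1)) &&& 2 ^ j : Nat) : Int) := by
  have h2j : ((2 : Int) ^ j) = ((2 ^ j : Nat) : Int) := by push_cast; ring
  by_cases h : 0 ≤ a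
  · rw [PySem.Int.band, if_pos h, if_pos (by positivity)]
    rw [pvM_of_nonneg a h]
    congr 1
    rw [h2j, Int.toNat_natCast]
    rw [Nat.and_two_pow, Nat.and_two_pow, Nat.testBit_mod_two_pow]
    simp
  · rw [PySem.Int.band, if_neg h, if_pos (by positivity)]
    rw [h2j, Int.toNat_natCast]
    set m : Nat := (-a - 1).toNat with hm
    rw [Nat.two_pow_and]
    rw [pvM_of_neg a (by omega) (j + 1)]
    rw [Nat.and_two_pow]
    rw [pvTestBit_compl (j + 1) (m % 2 ^ (j + 1)) j (Nat.mod_lt _ (by positivity)) (by omega)]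
    rw [Nat.testBit_mod_two_pow]
    simp only [Nat.lt_succ_self, decide_true, Bool.true_and]
    cases hb : m.testBit j <;> simp [hb, Nat.mul_comm]

-- a & (2^n - 1) is the low n bits of a
theorem pvBandMask (a : Int) (n : Nat) :
    PySem.Int.band a ((2 : Int) ^ n - 1) = ((pvM a n : Nat) : Int) := by
  have hmask : ((2 : Int) ^ n - 1) = (((2 ^ n - 1 : Nat) : Nat) : Int) := by
    have : (1:Nat) ≤ 2 ^ n := Nat.one_le_two_pow
    push_cast [this]; ring
  have hnn : (0:Int) ≤ (2 : Int) ^ n - 1 := by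
    have : ((1:Int)) ≤ 2 ^ n := one_le_pow₀ (by omega)
    omega
  by_cases h : 0 ≤ a
  · rw [PySem.Int.band, if_pos h, if_pos hnn]
    rw [pvM_of_nonneg a h, hmask, Int.toNat_natCast]
    congr 1
    exact Nat.and_two_pow_sub_one_eq_mod _ n
  · rw [PySem.Int.band, if_neg h, if_pos hnn]
    rw [hmask, Int.toNat_natCast]
    set m : Nat := (-a - 1).toNat with hm
    rw [Nat.and_comm, Nat.and_two_pow_sub_one_eq_mod]
    rw [pvM_of_neg a (by omega) n]

-- the low n bits of a ^ b are the xor of the low n bits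
theorem pvBxorM (a b : Int) (n : Nat) : pvM (PySem.Int.bxor a b) n = pvM a n ^^^ pvM b n := by
  have key : ∀ x y : Nat, (x ^^^ y) % 2 ^ n = x % 2 ^ n ^^^ y % 2 ^ n := by
    intro x y
    apply Nat.eq_of_testBit_eq
    intro i
    simp only [Nat.testBit_mod_two_pow, Nat.testBit_xor]
    cases hd : decide (i < n) <;> simp
  have hone : (1:Nat) ≤ 2 ^ n := Nat.one_le_two_pow
  have hmlt : ∀ w : Nat, w % 2 ^ n < 2 ^ n := fun w => Nat.mod_lt _ (by omega)
  have hclt : ∀ w : Nat, 2 ^ n - 1 - w % 2 ^ n < 2 ^ n := fun w => by have := hmlt w; omega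
  have ext : ∀ u v : Nat, u < 2 ^ n → v < 2 ^ n →
      (∀ i, i < n → u.testBit i = v.testBit i) → u = v := by
    intro u v hu hv hbit
    apply Nat.eq_of_testBit_eq
    intro i
    by_cases hi : i < n
    · exact hbit i hi
    · rw [Nat.testBit_lt_two_pow (lt_of_lt_of_le hu (Nat.pow_le_pow_right (by omega) (by omega))),
          Nat.testBit_lt_two_pow (lt_of_lt_of_le hv (Nat.pow_le_pow_right (by omega) (by omega)))]
  by_cases ha : 0 ≤ a <;> by_cases hb : 0 ≤ b
  · rw [PySem.Int.bxor, if_pos ha, if_pos hb]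
    rw [pvM_of_nonneg _ (by positivity), Int.toNat_natCast,
        pvM_of_nonneg a ha, pvM_of_nonneg b hb]
    exact key _ _
  · rw [PySem.Int.bxor, if_pos ha, if_neg hb]
    set z : Nat := a.toNat ^^^ (-b - 1).toNat with hz
    have hneg : (-(z:Int) - 1) < 0 := by omega
    have htn : (-(-(z:Int) - 1) - 1).toNat = z := by omega
    rw [pvM_of_neg _ hneg n, htn]
    rw [pvM_of_nonneg a ha, pvM_of_neg b (by omega) n]
    apply ext _ _ (hclt z) (Nat.xor_lt_two_pow (hmlt _) (hclt _))
    intro i hi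
    rw [Nat.testBit_xor]
    rw [pvTestBit_compl n (z % 2 ^ n) i (hmlt _) hi]
    rw [Nat.testBit_mod_two_pow, Nat.testBit_mod_two_pow, hz, Nat.testBit_xor]
    rw [pvTestBit_compl n ((-b - 1).toNat % 2 ^ n) i (hmlt _) hi]
    rw [Nat.testBit_mod_two_pow]
    cases a.toNat.testBit i <;> cases (-b - 1).toNat.testBit i <;> simp [hi]
  · rw [PySem.Int.bxor, if_neg ha, if_pos hb]
    set z : Nat := (-a - 1).toNat ^^^ b.toNat with hz
    have hneg : (-(z:Int) - 1) < 0 := by omega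
    have htn : (-(-(z:Int) - 1) - 1).toNat = z := by omega
    rw [pvM_of_neg _ hneg n, htn]
    rw [pvM_of_neg a (by omega) n, pvM_of_nonneg b hb]
    apply ext _ _ (hclt z) (Nat.xor_lt_two_pow (hclt _) (hmlt _))
    intro i hi
    rw [Nat.testBit_xor]
    rw [pvTestBit_compl n (z % 2 ^ n) i (hmlt _) hi]
    rw [Nat.testBit_mod_two_pow, hz, Nat.testBit_xor]
    rw [pvTestBit_compl n ((-a - 1).toNat % 2 ^ n) i (hmlt _) hi]
    rw [Nat.testBit_mod_two_pow, Nat.testBit_mod_two_pow]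
    cases (-a - 1).toNat.testBit i <;> cases b.toNat.testBit i <;> simp [hi]
  · rw [PySem.Int.bxor, if_neg ha, if_neg hb]
    rw [pvM_of_nonneg _ (by positivity), Int.toNat_natCast]
    rw [pvM_of_neg a (by omega) n, pvM_of_neg b (by omega) n]
    rw [key]
    apply ext _ _ (Nat.xor_lt_two_pow (hmlt _) (hmlt _)) (Nat.xor_lt_two_pow (hclt _) (hclt _))
    intro i hi
    rw [Nat.testBit_xor, Nat.testBit_xor]
    rw [Nat.testBit_mod_two_pow, Nat.testBit_mod_two_pow]
    rw [pvTestBit_compl n ((-a - 1).toNat % 2 ^ n) i (hmlt _) hi]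
    rw [pvTestBit_compl n ((-b - 1).toNat % 2 ^ n) i (hmlt _) hi]
    rw [Nat.testBit_mod_two_pow, Nat.testBit_mod_two_pow]
    cases (-a - 1).toNat.testBit i <;> cases (-b - 1).toNat.testBit i <;> simp [hi]

theorem pvPow2_eq (m : Nat) : pvPow2 m = (2 : Int) ^ m := by
  unfold pvPow2
  rw [Nat.shiftLeft_eq, one_mul]
  push_cast
  ring

theorem pvShiftRight_eq_zero_iff (n h : Nat) : n >>> h = 0 ↔ n < 2 ^ h := by
  rw [Nat.shiftRight_eq_div_pow]
  exact Nat.div_eq_zero_iff_lt (by positivity)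

theorem pvSize_shiftRight (n h : Nat) (hn : 2 ^ h ≤ n) : (n >>> h).size = n.size - h := by
  have hs1 : h < n.size := Nat.lt_size.mpr hn
  rw [Nat.shiftRight_eq_div_pow]
  have hub : n < 2 ^ n.size := Nat.lt_size_self n
  have hle : (n / 2 ^ h).size ≤ n.size - h := by
    rw [Nat.size_le]
    apply Nat.div_lt_of_lt_mul
    calc n < 2 ^ n.size := hub
    _ = 2 ^ h * 2 ^ (n.size - h) := by rw [← pow_add]; congr 1; omega
  have hge : n.size - h - 1 < (n / 2 ^ h).size := by
    rw [Nat.lt_size, Nat.le_div_iff_mul_le (by positivity : 0 < 2 ^ h)]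
    calc 2 ^ (n.size - h - 1) * 2 ^ h = 2 ^ (n.size - 1) := by rw [← pow_add]; congr 1; omega
    _ ≤ n := Nat.lt_size.mp (by omega)
  omega

theorem pvSizeGo_eq : ∀ (fuel e n : Nat), e ≤ fuel → n < 2 ^ e → pvSizeGo fuel n e = n.size := by
  intro fuel
  induction fuel with
  | zero =>
    intro e n he hn
    interval_cases e
    simp at hn
    simp [pvSizeGo, hn]
  | succ fuel ih =>
    intro e n he hn
    rw [pvSizeGo]
    by_cases he1 : e ≤ 1
    · rw [if_pos he1]
      interval_cases e
      · simp at hn; simp [hn]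
      · interval_cases n
        · simp
        · simp [Nat.size_one]
    · rw [if_neg he1]
      simp only
      by_cases hz : n >>> (e / 2) = 0
      · rw [if_pos hz]
        exact ih (e / 2) n (by omega) ((pvShiftRight_eq_zero_iff n (e / 2)).mp hz)
      · rw [if_neg hz]
        have hge : 2 ^ (e / 2) ≤ n := by
          have := (pvShiftRight_eq_zero_iff n (e / 2)).not.mp hz
          omega
        have hlt : n >>> (e / 2) < 2 ^ (e - e / 2) := by
          rw [Nat.shiftRight_eq_div_pow]
          apply Nat.div_lt_of_lt_mul
          calc n < 2 ^ e := hn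
          _ = 2 ^ (e / 2) * 2 ^ (e - e / 2) := by rw [← pow_add]; congr 1; omega
        rw [ih (e - e / 2) (n >>> (e / 2)) (by omega) hlt]
        rw [pvSize_shiftRight n (e / 2) hge]
        have := Nat.lt_size.mpr hge
        omega

theorem pvSizeUp_eq : ∀ (fuel n e : Nat), 1 ≤ e → n < 2 ^ (e * 2 ^ fuel) → pvSizeUp fuel n e = n.size := by
  intro fuel
  induction fuel with
  | zero =>
    intro n e he hn
    rw [pvSizeUp]
    exact pvSizeGo_eq e e n le_rfl (by simpa using hn)
  | succ fuel ih =>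
    intro n e he hn
    rw [pvSizeUp]
    by_cases hz : n >>> e = 0
    · rw [if_pos hz]
      exact pvSizeGo_eq e e n le_rfl ((pvShiftRight_eq_zero_iff n e).mp hz)
    · rw [if_neg hz]
      apply ih n (e * 2) (by omega)
      calc n < 2 ^ (e * 2 ^ (fuel + 1)) := hn
      _ = 2 ^ (e * 2 * 2 ^ fuel) := by congr 1; ring

-- Python's bit_length on a natural is Nat.size
theorem pvBitLen_eq (z : Nat) : pvBitLen ((z : Nat) : Int) = z.size := by
  unfold pvBitLen
  rw [Int.natAbs_natCast]
  apply pvSizeUp_eq (z + 1) z 1 le_rfl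
  calc z < 2 ^ z := Nat.lt_two_pow_self
  _ ≤ 2 ^ (1 * 2 ^ (z + 1)) := Nat.pow_le_pow_right (by omega) (by
      have h1 : z < 2 ^ z := Nat.lt_two_pow_self
      have h2 : 2 ^ z ≤ 2 ^ (z + 1) := Nat.pow_le_pow_right (by omega) (by omega)
      omega)

theorem pvSize_shift (z j k : Nat) (h1 : 2 ^ j ≤ z) (h2 : z < 2 ^ (j + 1)) (hk : k ≤ j) :
    (z >>> k).size = j + 1 - k := by
  rw [Nat.shiftRight_eq_div_pow]
  have hle : (z / 2 ^ k).size ≤ j + 1 - k := by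
    rw [Nat.size_le]
    apply Nat.div_lt_of_lt_mul
    calc z < 2 ^ (j + 1) := h2
    _ = 2 ^ k * 2 ^ (j + 1 - k) := by rw [← pow_add]; congr 1; omega
  have hge : j - k < (z / 2 ^ k).size := by
    rw [Nat.lt_size, Nat.le_div_iff_mul_le (by positivity)]
    calc 2 ^ (j - k) * 2 ^ k = 2 ^ j := by rw [← pow_add]; congr 1; omega
    _ ≤ z := h1
  omega

-- (x ^^^ y) % 2^(j+1) drops to % 2^j when bit j of x and y agree
theorem pvXorMod_drop (x y j : Nat) (h : x.testBit j = y.testBit j) :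
    (x ^^^ y) % 2 ^ (j + 1) = (x ^^^ y) % 2 ^ j := by
  have hbit : (x ^^^ y).testBit j = false := by
    rw [Nat.testBit_xor, h]; simp
  rw [pow_succ, Nat.mod_mul]
  rw [Nat.testBit_eq_decide_div_mod_eq] at hbit
  simp only [decide_eq_false_iff_not] at hbit
  have : (x ^^^ y) / 2 ^ j % 2 = 0 := by omega
  rw [this]
  omega

theorem pvXorModSize_le (x y j : Nat) : ((x ^^^ y) % 2 ^ (j + 1)).size ≤ j + 1 :=
  Nat.size_le.mpr (Nat.mod_lt _ (by positivity))

-- once counting has started, A counts every remaining bit down to the first mismatch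
theorem pvCnt_true (x y : Nat) : ∀ j, pvCnt x y true j = ((j + 1 - ((x ^^^ y) % 2 ^ (j + 1)).size : Nat) : Int) := by
  intro j
  induction j with
  | zero =>
    simp only [pvCnt, Bool.true_or]
    by_cases h : x.testBit 0 = y.testBit 0
    · rw [if_pos h]
      have hbit : (x ^^^ y).testBit 0 = false := by rw [Nat.testBit_xor, h]; simp
      have : (x ^^^ y) % 2 ^ 1 = 0 := by
        rw [Nat.testBit_eq_decide_div_mod_eq] at hbit
        simp only [decide_eq_false_iff_not] at hbit
        simpa using hbit
      rw [this]
      simp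
    · rw [if_neg h]
      have hbit : (x ^^^ y).testBit 0 = true := by
        rw [Nat.testBit_xor]; cases hx : x.testBit 0 <;> cases hy : y.testBit 0 <;>
          simp_all
      have h1 : (x ^^^ y) % 2 ^ 1 = 1 := by
        rw [Nat.testBit_eq_decide_div_mod_eq] at hbit
        simp only [decide_eq_true_eq] at hbit
        simpa using hbit
      rw [h1]
      simp
  | succ j ih =>
    simp only [pvCnt, Bool.true_or]
    by_cases h : x.testBit (j + 1) = y.testBit (j + 1)
    · rw [if_pos h, ih, pvXorMod_drop x y (j + 1) h]
      have := pvXorModSize_le x y j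
      push_cast
      omega
    · rw [if_neg h]
      have hbit : (x ^^^ y).testBit (j + 1) = true := by
        rw [Nat.testBit_xor]; cases hx : x.testBit (j + 1) <;> cases hy : y.testBit (j + 1) <;>
          simp_all
      have hb2 : ((x ^^^ y) % 2 ^ (j + 2)).testBit (j + 1) = true := by
        rw [Nat.testBit_mod_two_pow, hbit]; simp
      have hge : 2 ^ (j + 1) ≤ (x ^^^ y) % 2 ^ (j + 2) := Nat.ge_two_pow_of_testBit hb2
      have hlt : (x ^^^ y) % 2 ^ (j + 2) < 2 ^ (j + 2) := Nat.mod_lt _ (by positivity)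
      have hs : ((x ^^^ y) % 2 ^ (j + 2)).size = j + 2 := by
        have u1 := Nat.size_le.mpr hlt
        have u2 := Nat.lt_size.mpr hge
        omega
      rw [hs]
      simp

-- closed form for A's count: the size of the matched-prefix bits of x above the first mismatch
theorem pvCnt_false (x y : Nat) : ∀ j, pvCnt x y false j =
    (((x % 2 ^ (j + 1)) >>> ((x ^^^ y) % 2 ^ (j + 1)).size).size : Int) := by
  intro j
  induction j with
  | zero =>
    simp only [pvCnt, Bool.false_or]
    have hx1 : x % 2 ^ 1 = (x.testBit 0).toNat := by
      rw [Nat.testBit_eq_decide_div_mod_eq]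
      cases hd : decide (x / 2 ^ 0 % 2 = 1) <;> simp_all <;> omega
    by_cases h : x.testBit 0 = y.testBit 0
    · rw [if_pos h]
      have hbit : (x ^^^ y).testBit 0 = false := by rw [Nat.testBit_xor, h]; simp
      have hz : (x ^^^ y) % 2 ^ 1 = 0 := by
        rw [Nat.testBit_eq_decide_div_mod_eq] at hbit
        simp only [decide_eq_false_iff_not] at hbit
        simpa using hbit
      rw [hz, Nat.size_zero, hx1]
      cases hb : x.testBit 0 <;> simp
    · rw [if_neg h]
      have hlt : x % 2 ^ 1 < 2 ^ 1 := Nat.mod_lt _ (by positivity)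
      have : (x % 2 ^ 1) >>> ((x ^^^ y) % 2 ^ 1).size = 0 ∨ ((x ^^^ y) % 2 ^ 1).size = 0 := by
        have hbit : (x ^^^ y).testBit 0 = true := by
          rw [Nat.testBit_xor]; cases hx : x.testBit 0 <;> cases hy : y.testBit 0 <;> simp_all
        have h1 : (x ^^^ y) % 2 ^ 1 = 1 := by
          rw [Nat.testBit_eq_decide_div_mod_eq] at hbit
          simp only [decide_eq_true_eq] at hbit
          simpa using hbit
        left
        rw [h1]
        rw [Nat.shiftRight_eq_div_pow]
        simp only [Nat.size_one]
        omega
      rcases this with h0 | h0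
      · rw [h0]; simp
      · have hbit : (x ^^^ y).testBit 0 = true := by
          rw [Nat.testBit_xor]; cases hx : x.testBit 0 <;> cases hy : y.testBit 0 <;> simp_all
        have h1 : (x ^^^ y) % 2 ^ 1 = 1 := by
          rw [Nat.testBit_eq_decide_div_mod_eq] at hbit
          simp only [decide_eq_true_eq] at hbit
          simpa using hbit
        rw [h1] at h0
        simp [Nat.size_one] at h0
  | succ j ih =>
    simp only [pvCnt, Bool.false_or]
    by_cases h : x.testBit (j + 1) = y.testBit (j + 1)
    · rw [if_pos h]
      have hdropx : x % 2 ^ (j + 2) % 2 ^ (j + 1) = x % 2 ^ (j + 1) :=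
        Nat.mod_mod_of_dvd x (pow_dvd_pow 2 (by omega))
      by_cases hb : x.testBit (j + 1)
      · -- counting starts (or continues) here
        rw [hb, if_pos rfl, pvCnt_true x y j]
        have hxb : (x % 2 ^ (j + 2)).testBit (j + 1) = true := by
          rw [Nat.testBit_mod_two_pow, hb]; simp
        have hge : 2 ^ (j + 1) ≤ x % 2 ^ (j + 2) := Nat.ge_two_pow_of_testBit hxb
        have hlt : x % 2 ^ (j + 2) < 2 ^ (j + 2) := Nat.mod_lt _ (by positivity)
        rw [pvXorMod_drop x y (j + 1) h]
        have hk : ((x ^^^ y) % 2 ^ (j + 1)).size ≤ j + 1 := pvXorModSize_le x y j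
        rw [pvSize_shift (x % 2 ^ (j + 2)) (j + 1) _ hge hlt hk]
        push_cast
        omega
      · -- bit j+1 of x (and y) is 0: nothing changes
        have hb' : x.testBit (j + 1) = false := by simpa using hb
        rw [hb', if_neg (by simp), ih, zero_add]
        have hdropxor := pvXorMod_drop x y (j + 1) h
        have hdropx2 : x % 2 ^ (j + 2) = x % 2 ^ (j + 1) := by
          have hxb : x.testBit (j + 1) = false := by simpa using hb
          rw [pow_succ, Nat.mod_mul]
          rw [Nat.testBit_eq_decide_div_mod_eq] at hxb
          simp only [decide_eq_false_iff_not] at hxb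
          have : x / 2 ^ (j + 1) % 2 = 0 := by omega
          rw [this]
          omega
        rw [hdropxor, hdropx2]
    · rw [if_neg h]
      have hbit : (x ^^^ y).testBit (j + 1) = true := by
        rw [Nat.testBit_xor]; cases hx : x.testBit (j + 1) <;> cases hy : y.testBit (j + 1) <;> simp_all
      have hb2 : ((x ^^^ y) % 2 ^ (j + 2)).testBit (j + 1) = true := by
        rw [Nat.testBit_mod_two_pow, hbit]; simp
      have hge : 2 ^ (j + 1) ≤ (x ^^^ y) % 2 ^ (j + 2) := Nat.ge_two_pow_of_testBit hb2
      have hlt : (x ^^^ y) % 2 ^ (j + 2) < 2 ^ (j + 2) := Nat.mod_lt _ (by positivity)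
      have hs : ((x ^^^ y) % 2 ^ (j + 2)).size = j + 2 := by
        have u1 := Nat.size_le.mpr hlt
        have u2 := Nat.lt_size.mpr hge
        omega
      rw [hs]
      have hxlt : x % 2 ^ (j + 2) < 2 ^ (j + 2) := Nat.mod_lt _ (by positivity)
      have : (x % 2 ^ (j + 2)) >>> (j + 2) = 0 := by
        rw [Nat.shiftRight_eq_div_pow]
        exact Nat.div_eq_of_lt hxlt
      rw [this, Nat.size_zero]
      simp

-- pvCnt only reads bits 0..j
theorem pvCnt_congr (x x' y y' : Nat) : ∀ (j : Nat) (bS : Bool),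
    (∀ i, i ≤ j → x.testBit i = x'.testBit i) → (∀ i, i ≤ j → y.testBit i = y'.testBit i) →
    pvCnt x y bS j = pvCnt x' y' bS j := by
  intro j
  induction j with
  | zero =>
    intro bS hx hy
    simp only [pvCnt, hx 0 le_rfl, hy 0 le_rfl]
  | succ j ih =>
    intro bS hx hy
    simp only [pvCnt, hx (j + 1) le_rfl, hy (j + 1) le_rfl]
    rw [ih (bS || x'.testBit (j + 1)) (fun i hi => hx i (by omega)) (fun i hi => hy i (by omega))]

theorem pvPowShift (j : Nat) : ((2 : Int) ^ (j + 1)) >>> (1 : Nat) = (2 : Int) ^ j := by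
  have h1 : ((2 : Int) ^ (j + 1)) = ((2 ^ (j + 1) : Nat) : Int) := by push_cast; ring
  have h2 : ((2 : Int) ^ j) = ((2 ^ j : Nat) : Int) := by push_cast; ring
  rw [h1, h2, ← Int.natCast_shiftRight]
  congr 1
  rw [Nat.shiftRight_eq_div_pow, pow_succ, pow_one]
  omega

-- A's loop started at flag 2^j is pvCnt over the low j+1 bits
theorem pvLoop_eq (a b : Int) : ∀ (j : Nat) (ret : Int) (bS : Bool),
    nCorrectBitsLoop a b ((2 : Int) ^ j) ret bS = ret + pvCnt (pvM a (j + 1)) (pvM b (j + 1)) bS j := by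
  intro j
  induction j with
  | zero =>
    intro ret bS
    rw [nCorrectBitsLoop]
    rw [pvBandPow a 0, pvBandPow b 0]
    by_cases h : (pvM a 1).testBit 0 = (pvM b 1).testBit 0
    · rw [dif_pos (by
        constructor
        · norm_num
        · rw [Nat.and_two_pow, Nat.and_two_pow, h])]
      have hz : ((2:Int) ^ 0) >>> (1 : Nat) = 0 := by decide
      have hstop : nCorrectBitsLoop a b (((2:Int) ^ 0) >>> (1 : Nat)) (if bS || decide ((((pvM a 1) &&& 2 ^ 0 : Nat) : Int) ≠ 0) then ret + 1 else ret) (bS || decide ((((pvM a 1) &&& 2 ^ 0 : Nat) : Int) ≠ 0)) = (if bS || decide ((((pvM a 1) &&& 2 ^ 0 : Nat) : Int) ≠ 0) then ret + 1 else ret) := by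
        rw [nCorrectBitsLoop, hz]
        rw [dif_neg (by simp)]
      rw [hstop]
      have hbz : decide ((((pvM a 1) &&& 2 ^ 0 : Nat) : Int) ≠ 0) = (pvM a 1).testBit 0 := by
        rw [Nat.and_two_pow]
        cases hb : (pvM a 1).testBit 0 <;> simp [hb]
      rw [hbz]
      simp only [pvCnt, if_pos h]
      cases hc : bS || (pvM a 1).testBit 0 <;> simp [hc] <;> ring
    · rw [dif_neg (by
        intro hc
        apply h
        have := hc.2
        have hinj : ((pvM a 1) &&& 2 ^ 0 : Nat) = ((pvM b 1) &&& 2 ^ 0 : Nat) := by exact_mod_cast this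
        rw [Nat.and_two_pow, Nat.and_two_pow] at hinj
        have h2 : ((pvM a 1).testBit 0).toNat = ((pvM b 1).testBit 0).toNat :=
          Nat.eq_of_mul_eq_mul_right (by positivity) hinj
        revert h2
        cases (pvM a 1).testBit 0 <;> cases (pvM b 1).testBit 0 <;> decide)]
      simp only [pvCnt, if_neg h]
      ring
  | succ j ih =>
    intro ret bS
    rw [nCorrectBitsLoop]
    rw [pvBandPow a (j + 1), pvBandPow b (j + 1)]
    have hcnt_drop : ∀ bS', pvCnt (pvM a (j + 1)) (pvM b (j + 1)) bS' j = pvCnt (pvM a (j + 2)) (pvM b (j + 2)) bS' j := by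
      intro bS'
      apply pvCnt_congr _ _ _ _ j bS'
      · intro i hi
        rw [← pvM_mod a (j + 2) (j + 1) (by omega), Nat.testBit_mod_two_pow]
        simp [Nat.lt_succ_of_le hi]
      · intro i hi
        rw [← pvM_mod b (j + 2) (j + 1) (by omega), Nat.testBit_mod_two_pow]
        simp [Nat.lt_succ_of_le hi]
    by_cases h : (pvM a (j + 2)).testBit (j + 1) = (pvM b (j + 2)).testBit (j + 1)
    · rw [dif_pos (by
        constructor
        · positivity
        · rw [Nat.and_two_pow, Nat.and_two_pow, h])]
      rw [pvPowShift j]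
      rw [ih]
      have hbz : decide ((((pvM a (j + 2)) &&& 2 ^ (j + 1) : Nat) : Int) ≠ 0) = (pvM a (j + 2)).testBit (j + 1) := by
        rw [Nat.and_two_pow]
        cases hb : (pvM a (j + 2)).testBit (j + 1) <;> simp [hb]
      rw [hbz]
      rw [hcnt_drop]
      simp only [pvCnt, if_pos h]
      cases hc : bS || (pvM a (j + 2)).testBit (j + 1) <;> simp [hc] <;> ring
    · rw [dif_neg (by
        intro hc
        apply h
        have := hc.2
        have hinj : ((pvM a (j + 2)) &&& 2 ^ (j + 1) : Nat) = ((pvM b (j + 2)) &&& 2 ^ (j + 1) : Nat) := by exact_mod_cast this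
        rw [Nat.and_two_pow, Nat.and_two_pow] at hinj
        have h2 : ((pvM a (j + 2)).testBit (j + 1)).toNat = ((pvM b (j + 2)).testBit (j + 1)).toNat :=
          Nat.eq_of_mul_eq_mul_right (by positivity) hinj
        revert h2
        cases (pvM a (j + 2)).testBit (j + 1) <;> cases (pvM b (j + 2)).testBit (j + 1) <;> decide)]
      simp only [pvCnt, if_neg h]
      ring

-- ===== VERDICT (by name: the statement is the Claim_ definition above) =====
theorem nCorrectBits_spec : Claim_equal_nCorrectBits := by
  intro a b maxnbits _ hpre
  unfold Spec_nCorrectBits nCorrectBits nCorrectBits_alt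
  simp only []
  set m : Nat := (maxnbits - 1).toNat with hm
  rw [pvPow2_eq m]
  have hmask : (((2 : Int) ^ m) <<< (1 : Nat)) - 1 = (2 : Int) ^ (m + 1) - 1 := by
    rw [Int.shiftLeft_eq]; ring
  rw [hmask]
  rw [pvLoop_eq a b m 0 false, zero_add]
  set x : Nat := pvM a (m + 1) with hx
  set y : Nat := pvM b (m + 1) with hy
  rw [pvBandMask (PySem.Int.bxor a b) (m + 1), pvBxorM a b (m + 1)]
  rw [pvBandMask a (m + 1)]
  rw [pvBitLen_eq (x ^^^ y)]
  rw [← Int.natCast_shiftRight]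
  rw [pvBitLen_eq]
  rw [pvCnt_false x y m]
  have hxlt : x < 2 ^ (m + 1) := pvM_lt a (m + 1)
  have hylt : y < 2 ^ (m + 1) := pvM_lt b (m + 1)
  rw [Nat.mod_eq_of_lt hxlt, Nat.mod_eq_of_lt (Nat.xor_lt_two_pow hxlt hylt)]
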